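-- pv_equiv track=rewrite | github.com/ckoval7/pydigi | pydigi/varicode/navtex_varicode.py | create_fec_interleaved
-- ===== SOURCE A (Python) =====
-- from typing import List, Tuple, Optional
--
-- CODE_ALPHA = 0x0F  # Alpha character marker (binary: 0001111)
--
-- CODE_REP = 0x66  # Repeat/redundancy marker (binary: 1100110)
--
-- CODE_CHAR32 = 0x6A  # Space character code (binary: 1101010)
--
-- def create_fec_interleaved(codes: List[int]) -> List[int]:
--     """
--     Create FEC (Forward Error Correction) interleaved code sequence.
--
--     In NAVTEX, each character is transmitted twice for error correction:
--     - First transmission (alpha) followed by second transmission (rep)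
--     - Pattern: rep alpha rep alpha char1 alpha char2 char1 char3 char2 ...
--     - Each character is repeated 5 characters (35 bits) later
--
--     This implements the FEC pattern used in SITOR-B.
--
--     Args:
--         codes: List of 7-bit CCIR-476 codes to transmit
--
--     Returns:
--         FEC-interleaved code sequence with rep/alpha markers
--
--     Example:
--         >>> create_fec_interleaved([0x59, 0x47])  # "NA"
--         [0x66, 0x0F, 0x66, 0x0F, 0x59, 0x0F, 0x47, 0x59, ...]
--     """
--     result = []
--     offset = 2  # Offset for interleaving (2 characters ahead)
--
--     # Add initial rep/alpha sequence
--     for _ in range(offset):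
--         result.append(CODE_REP)
--         result.append(CODE_ALPHA)
--
--     # Interleave characters
--     for i, code in enumerate(codes):
--         result.append(code)
--         if i >= offset:
--             result.append(codes[i - offset])
--         else:
--             result.append(CODE_ALPHA)
--
--     # Add trailing characters
--     sz = len(codes)
--     for i in range(offset):
--         result.append(CODE_CHAR32)  # Space character
--         result.append(codes[sz - offset + i])
--
--     return result
-- ===== SOURCE B (Python) =====
-- CODE_ALPHA = 0x0F
-- CODE_REP = 0x66
-- CODE_CHAR32 = 0x6A
--
-- def create_fec_interleaved(codes):
--     offset = 2
--     # direct stream: rep markers, the message, then space fill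
--     primary = [CODE_REP] * offset + list(codes) + [CODE_CHAR32] * offset
--     # delayed stream: the same message shifted 2*offset slots right, alpha fill in front
--     secondary = [CODE_ALPHA] * (2 * offset) + list(codes)
--     return [x for pair in zip(primary, secondary) for x in pair]
-- ===== Notes on version B (the rewrite author's own statement) =====
-- stated objective: simpler
-- what changed: Instead of three sequential append loops with index arithmetic into the growing result, B builds the two FEC streams as whole lists (direct stream = rep,rep + codes + space,space; delayed stream = four alphas + codes) and zips/flattens them.
-- intended difference: On single-element inputs whose element is not the alpha marker, A's trailing loop hits negative-index wraparound and repeats the lone character in both trailing delayed slots, while B keeps the first trailing delayed slot as the alpha marker, which is the intended five-slot-delay FEC pattern. — e.g. on create_fec_interleaved([5]): A returns [102, 15, 102, 15, 5, 15, 106, 5, 106, 5], B returns [102, 15, 102, 15, 5, 15, 106, 15, 106, 5]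
import Mathlib
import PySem

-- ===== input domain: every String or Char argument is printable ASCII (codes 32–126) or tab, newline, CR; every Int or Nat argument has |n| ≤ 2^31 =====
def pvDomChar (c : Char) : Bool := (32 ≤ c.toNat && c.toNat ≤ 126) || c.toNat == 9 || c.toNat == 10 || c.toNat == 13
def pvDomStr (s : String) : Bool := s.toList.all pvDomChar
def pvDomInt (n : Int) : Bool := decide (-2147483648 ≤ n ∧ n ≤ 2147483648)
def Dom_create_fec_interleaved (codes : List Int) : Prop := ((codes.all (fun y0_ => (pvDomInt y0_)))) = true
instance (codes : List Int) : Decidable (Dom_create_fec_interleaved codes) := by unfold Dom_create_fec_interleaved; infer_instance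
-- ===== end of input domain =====

-- B builds the two FEC streams (direct and delayed) as whole lists and zips them,
-- instead of A's three sequential append loops with index arithmetic.

-- ===== PORT A =====
-- literal port of A: three appending loops; pyGet? mirrors Python indexing
-- (negative wraparound; `.getD 0` is only reached where Python raises IndexError,
-- i.e. codes = [], which Pre_ excludes)
def create_fec_interleaved (codes : List Int) : List Int :=
  let offset : Int := 2
  let result : List Int := []
  let result := (PySem.List.pyRange 0 offset 1).foldl
      (fun acc _ => (acc ++ [0x66]) ++ [0x0F]) result
  let result := (PySem.List.enumerate codes).foldl
      (fun acc p =>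
        if p.1 ≥ offset then
          (acc ++ [p.2]) ++ [(PySem.List.pyGet? codes (p.1 - offset)).getD 0]
        else
          (acc ++ [p.2]) ++ [0x0F]) result
  let sz : Int := codes.length
  (PySem.List.pyRange 0 offset 1).foldl
      (fun acc i => (acc ++ [0x6A]) ++ [(PySem.List.pyGet? codes (sz - offset + i)).getD 0]) result

-- ===== PORT B =====
-- port of B: direct stream and delayed stream built whole, then zipped and flattened
def create_fec_interleaved_alt (codes : List Int) : List Int :=
  let offset : Nat := 2
  let primary := List.replicate offset (0x66 : Int) ++ codes ++ List.replicate offset (0x6A : Int)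
  let secondary := List.replicate (2 * offset) (0x0F : Int) ++ codes
  (primary.zip secondary).flatMap (fun p => [p.1, p.2])

-- ===== PRECONDITION & SPEC =====
-- Pre_ excludes only the empty list, on which A raises IndexError (codes[-2]).
def Pre_create_fec_interleaved (codes : List Int) : Prop := codes ≠ []
instance (codes : List Int) : Decidable (Pre_create_fec_interleaved codes) := by
  unfold Pre_create_fec_interleaved; infer_instance
def pvWitness_create_fec_interleaved : List Int := [5, 7]

-- On single-element inputs whose element is not the alpha marker, A's trailing loop hits
-- negative-index wraparound and repeats the lone character in both trailing delayed slots,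
-- while B keeps the first trailing delayed slot as the alpha marker, which is the intended
-- five-slot-delay FEC pattern.
def D_create_fec_interleaved (codes : List Int) : Prop :=
  codes.length = 1 ∧ codes.head? ≠ some 0x0F
instance (codes : List Int) : Decidable (D_create_fec_interleaved codes) := by
  unfold D_create_fec_interleaved; infer_instance

def Spec_create_fec_interleaved (codes : List Int) (out : List Int) : Prop :=
  ¬ D_create_fec_interleaved codes → out = create_fec_interleaved_alt codes
instance (codes : List Int) (out : List Int) : Decidable (Spec_create_fec_interleaved codes out) := by
  unfold Spec_create_fec_interleaved; infer_instance

def pvDiffWitness_create_fec_interleaved : List Int := [5]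
def pvDiffWitnessOut_create_fec_interleaved : (List Int) × (List Int) :=
  ([102, 15, 102, 15, 5, 15, 106, 5, 106, 5],
   [102, 15, 102, 15, 5, 15, 106, 15, 106, 5])

-- ===== CLAIM (what is proved, stated in full; the proofs are below) =====
def Claim_unchanged_create_fec_interleaved : Prop := ∀ (codes : List Int), Dom_create_fec_interleaved codes → Pre_create_fec_interleaved codes → Spec_create_fec_interleaved codes (create_fec_interleaved codes)
def Claim_changed_create_fec_interleaved : Prop := Dom_create_fec_interleaved (pvDiffWitness_create_fec_interleaved) ∧ Pre_create_fec_interleaved (pvDiffWitness_create_fec_interleaved) ∧ D_create_fec_interleaved (pvDiffWitness_create_fec_interleaved) ∧ create_fec_interleaved (pvDiffWitness_create_fec_interleaved) = pvDiffWitnessOut_create_fec_interleaved.1 ∧ create_fec_interleaved_alt (pvDiffWitness_create_fec_interleaved) = pvDiffWitnessOut_create_fec_interleaved.2 ∧ pvDiffWitnessOut_create_fec_interleaved.1 ≠ pvDiffWitnessOut_create_fec_interleaved.2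
def Claim_exact_create_fec_interleaved : Prop := ∀ (codes : List Int), Dom_create_fec_interleaved codes → Pre_create_fec_interleaved codes → D_create_fec_interleaved codes → create_fec_interleaved codes ≠ create_fec_interleaved_alt codes

-- ===== LEMMAS AND PROOFS =====

-- Main invariant: A's remaining interleave loop (from index n, n ≥ 2) followed by the
-- trailing loop equals the zip of the rest of the direct stream with the delayed stream
-- from position n - 2.
theorem create_fec_key (codes : List Int) : ∀ (ys : List Int) (n : Nat), 2 ≤ n → n ≤ codes.length →
    ys = codes.drop n →
    (PySem.List.enumerate ys (n : Int)).flatMap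
        (fun (p : Int × Int) => if p.1 ≥ 2 then [p.2, (PySem.List.pyGet? codes (p.1 - 2)).getD 0]
                  else [p.2, 15])
      ++ [106, (PySem.List.pyGet? codes ((codes.length : Int) - 2)).getD 0,
          106, (PySem.List.pyGet? codes ((codes.length : Int) - 1)).getD 0]
    = ((ys ++ [106, 106]).zip (codes.drop (n - 2))).flatMap (fun (p : Int × Int) => [p.1, p.2]) := by
  intro ys
  induction ys with
  | nil =>
    intro n h2 hle hdrop
    have hn : n = codes.length := by
      have := List.drop_eq_nil_iff.mp hdrop.symm
      omega
    subst hn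
    have hlen2 : codes.length - 2 < codes.length := by omega
    have hlen1 : codes.length - 1 < codes.length := by omega
    have hd2 : codes.drop (codes.length - 2) = codes[codes.length - 2] :: codes.drop (codes.length - 1) := by
      have := List.drop_eq_getElem_cons hlen2
      have e : codes.length - 2 + 1 = codes.length - 1 := by omega
      rwa [e] at this
    have hd1 : codes.drop (codes.length - 1) = codes[codes.length - 1] :: codes.drop (codes.length - 1 + 1) := List.drop_eq_getElem_cons hlen1
    have e2 : ((codes.length : Int) - 2) = ((codes.length - 2 : Nat) : Int) := by omega
    have e1 : ((codes.length : Int) - 1) = ((codes.length - 1 : Nat) : Int) := by omega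
    have e0 : codes.length - 1 + 1 = codes.length := by omega
    rw [e2, e1, hd2, hd1, e0, ← hdrop]
    simp [hlen2, hlen1, PySem.List.enumerate_nil]
  | cons y ys ih =>
    intro n h2 hle hdrop
    have hlt : n < codes.length := by
      by_contra h
      have : codes.drop n = [] := List.drop_eq_nil_iff.mpr (by omega)
      rw [this] at hdrop; exact (List.cons_ne_nil _ _) hdrop
    have hcons : codes.drop n = codes[n] :: codes.drop (n+1) := List.drop_eq_getElem_cons hlt
    rw [hcons] at hdrop
    have hy : y = codes[n] := by injection hdrop
    have hys : ys = codes.drop (n+1) := by injection hdrop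
    have hn2 : n - 2 < codes.length := by omega
    have hdel : codes.drop (n - 2) = codes[n - 2] :: codes.drop (n - 1) := by
      have := List.drop_eq_getElem_cons hn2
      have e : n - 2 + 1 = n - 1 := by omega
      rwa [e] at this
    have hgen : PySem.List.enumerate (y :: ys) (n : Int)
        = ((n : Int), y) :: PySem.List.enumerate ys ((n : Int) + 1) := by
      simp [PySem.List.enumerate]
    have hge : ((n : Int)) ≥ 2 := by omega
    have hget : PySem.List.pyGet? codes ((n : Int) - 2) = some codes[n - 2] := by
      have e : ((n : Int) - 2) = ((n - 2 : Nat) : Int) := by omega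
      rw [e, PySem.List.pyGet?_natCast, List.getElem?_eq_getElem hn2]
    have ihx := ih (n+1) (by omega) (by omega) hys
    have e' : n + 1 - 2 = n - 1 := by omega
    rw [e'] at ihx
    rw [hgen]
    simp only [List.flatMap_cons, if_pos hge, hget, Option.getD_some, hdel, List.cons_append,
      List.zip_cons_cons, List.flatMap_cons]
    push_cast at ihx ⊢
    rw [List.append_assoc] at *
    simp only [List.nil_append, hy]
    rw [ihx]

theorem create_fec_main (a b : Int) (rest : List Int) :
    create_fec_interleaved (a :: b :: rest) = create_fec_interleaved_alt (a :: b :: rest) := by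
  have hr : PySem.List.pyRange 0 2 1 = [0, 1] := by decide
  have hk := create_fec_key (a :: b :: rest) rest 2 (by omega) (by simp) (by simp)
  unfold create_fec_interleaved create_fec_interleaved_alt
  simp only [hr]
  rw [show (fun (acc : List Int) (_ : Int) => (acc ++ [0x66]) ++ [0x0F])
        = (fun acc _ => acc ++ [0x66, 0x0F]) from by funext acc x; simp]
  rw [PySem.List.foldl_append_eq_flatMap]
  rw [show (fun (acc : List Int) (p : Int × Int) =>
        if p.1 ≥ 2 then (acc ++ [p.2]) ++ [(PySem.List.pyGet? (a :: b :: rest) (p.1 - 2)).getD 0]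
        else (acc ++ [p.2]) ++ [0x0F])
      = (fun acc p => acc ++ (if p.1 ≥ 2 then [p.2, (PySem.List.pyGet? (a :: b :: rest) (p.1 - 2)).getD 0] else [p.2, 15])) from by
    funext acc p; split_ifs <;> simp]
  rw [PySem.List.foldl_append_eq_flatMap]
  rw [show (fun (acc : List Int) (i : Int) =>
        (acc ++ [0x6A]) ++ [(PySem.List.pyGet? (a :: b :: rest) (((a :: b :: rest).length : Int) - 2 + i)).getD 0])
      = (fun acc i => acc ++ [0x6A, (PySem.List.pyGet? (a :: b :: rest) (((a :: b :: rest).length : Int) - 2 + i)).getD 0]) from by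
    funext acc i; simp]
  rw [PySem.List.foldl_append_eq_flatMap]
  have hen : PySem.List.enumerate (a :: b :: rest) (0:Int)
      = (0, a) :: (1, b) :: PySem.List.enumerate rest (2:Int) := by
    simp [PySem.List.enumerate_cons]
  rw [hen]
  simp only [List.flatMap_cons, List.flatMap_nil, List.nil_append, List.append_nil]
  norm_num
  have i1 : (↑rest.length + 1 + 1 - 2 : Int) = ((((a :: b :: rest).length : Int)) - 2 : Int) := by
    push_cast [List.length_cons]; ring
  have i2 : ((((a :: b :: rest).length : Int)) - 2 + 1 : Int) = ((((a :: b :: rest).length : Int)) - 1 : Int) := by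
    ring
  rw [i1, i2]
  norm_num at hk
  simp only [List.replicate, List.cons_append, List.zip_cons_cons, List.flatMap_cons]
  simp [hk]

-- ===== VERDICT (by name: the statement is the Claim_ definition above) =====
theorem create_fec_interleaved_spec : Claim_unchanged_create_fec_interleaved := by
  intro codes _ hpre hnd
  match codes with
  | [] => exact absurd rfl hpre
  | [c] =>
    have hc : c = 15 := by
      by_contra h
      exact hnd ⟨rfl, by simp [h]⟩
    subst hc
    decide
  | a :: b :: rest => exact create_fec_main a b rest

theorem create_fec_interleaved_changed : Claim_changed_create_fec_interleaved := by
  unfold Claim_changed_create_fec_interleaved; decide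

theorem create_fec_interleaved_tight : Claim_exact_create_fec_interleaved := by
  intro codes _ _ hd
  obtain ⟨h1, h2⟩ := hd
  match codes, h1 with
  | [c], _ =>
    have hc : c ≠ 15 := by simpa using h2
    intro heq
    have hr : PySem.List.pyRange 0 2 1 = [0, 1] := by decide
    simp [create_fec_interleaved, create_fec_interleaved_alt, hr, PySem.List.enumerate_cons,
      PySem.List.enumerate_nil, PySem.List.pyGet?, PySem.List.pyIdx?, List.replicate] at heq
    exact hc (by omega)
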